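-- pv_equiv track=rewrite | github.com/enricotomasi/GeeksforGeeks_problems | Easy/Maximum value.py | findMaxValue
-- ===== SOURCE A (Python) =====
-- def findMaxValue(arr, n):
--     # code here
--     if (n < 4):
--         return -1
--
--     a = arr[0] * -1
--     b = arr[1] - arr[0]
--     c = arr[1] - arr[0] - arr[2]
--     ans = arr[1] - arr[0] - arr[2] + arr [3]
--
--     for i in range(4, n):
--         a = max(a, arr[i-3] * - 1)
--         b = max(b, a + arr[i-2])
--         c = max(c, b - arr[i-1])
--         ans = max(ans, c + arr[i])
--
--     return ans
-- ===== SOURCE B (Python) =====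
-- def findMaxValue(arr, n):
--     if n < 4:
--         return -1
--     xs = arr[:n]
--     # Backward pass: best_right[t] (stored at index t) = max over r in [t, n-2]
--     # of (max(xs[r+1:]) - xs[r]), i.e. the best arr[s]-arr[r] with t <= r < s.
--     best_right = []            # built back-to-front, then reversed
--     suf_max = xs[n - 1]
--     cur = suf_max - xs[n - 2]
--     best_right.append(cur)     # t = n-2
--     for r in range(n - 3, 0, -1):
--         suf_max = max(suf_max, xs[r + 1])
--         cur = max(cur, suf_max - xs[r])
--         best_right.append(cur)
--     best_right.reverse()       # best_right[t-1] is the value for t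
--     # Forward pass: running prefix minimum; combine at the j index q.
--     pre_min = xs[0]
--     ans = xs[1] - pre_min + best_right[1]
--     for q in range(2, n - 2):
--         pre_min = min(pre_min, xs[q - 1])
--         ans = max(ans, xs[q] - pre_min + best_right[q])
--     return ans
-- ===== Notes on version B (the rewrite author's own statement) =====
-- stated objective: alternative
-- what changed: Replaces A's single forward chained 4-accumulator DP with a split decomposition: a backward pass builds a suffix table of the best arr[s]-arr[r] pair, a forward pass keeps a running prefix minimum, and the answer combines best left pair + best right pair at each split index.
import Mathlib
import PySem

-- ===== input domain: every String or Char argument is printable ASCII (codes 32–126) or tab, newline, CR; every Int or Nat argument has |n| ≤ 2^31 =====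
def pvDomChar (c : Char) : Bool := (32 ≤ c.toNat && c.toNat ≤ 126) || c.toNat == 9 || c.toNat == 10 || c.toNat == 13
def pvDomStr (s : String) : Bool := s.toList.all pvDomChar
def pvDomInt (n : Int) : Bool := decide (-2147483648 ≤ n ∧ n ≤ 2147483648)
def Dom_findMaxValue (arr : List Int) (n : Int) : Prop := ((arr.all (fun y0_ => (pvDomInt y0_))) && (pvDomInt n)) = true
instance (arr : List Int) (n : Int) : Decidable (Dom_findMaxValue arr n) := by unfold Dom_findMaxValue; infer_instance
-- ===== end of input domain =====

-- B replaces A's forward chained 4-accumulator DP by a suffix best-pair table plus a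
-- prefix-minimum scan combined at every split index (alternative decomposition, same O(n) cost).

-- ===== PORT A =====
-- loop body of A's for-loop (a, b, c, ans updated in order, each using the updated previous one)
def stepA (arr : List Int) (st : Int × Int × Int × Int) (i : Int) : Int × Int × Int × Int :=
  let a := max st.1 (PySem.List.pyGetD arr (i - 3) 0 * (-1))
  let b := max st.2.1 (a + PySem.List.pyGetD arr (i - 2) 0)
  let c := max st.2.2.1 (b - PySem.List.pyGetD arr (i - 1) 0)
  let ans := max st.2.2.2 (c + PySem.List.pyGetD arr i 0)
  (a, b, c, ans)

def findMaxValue (arr : List Int) (n : Int) : Int :=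
  if n < 4 then -1
  else
    -- initial (a, b, c, ans) of A, then A's for-loop
    ((PySem.List.pyRange 4 n 1).foldl (stepA arr)
      (PySem.List.pyGetD arr 0 0 * (-1),
       PySem.List.pyGetD arr 1 0 - PySem.List.pyGetD arr 0 0,
       PySem.List.pyGetD arr 1 0 - PySem.List.pyGetD arr 0 0 - PySem.List.pyGetD arr 2 0,
       PySem.List.pyGetD arr 1 0 - PySem.List.pyGetD arr 0 0 - PySem.List.pyGetD arr 2 0
         + PySem.List.pyGetD arr 3 0)).2.2.2

-- ===== PORT B =====
-- backward-pass body: carries (suf_max, cur, best_right-so-far)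
def stepB1 (xs : List Int) (st : Int × Int × List Int) (r : Int) : Int × Int × List Int :=
  let sm := max st.1 (PySem.List.pyGetD xs (r + 1) 0)
  let cur := max st.2.1 (sm - PySem.List.pyGetD xs r 0)
  (sm, cur, st.2.2 ++ [cur])

-- forward-pass body: carries (pre_min, ans)
def stepB2 (xs bestRight : List Int) (st : Int × Int) (q : Int) : Int × Int :=
  let pm := min st.1 (PySem.List.pyGetD xs (q - 1) 0)
  (pm, max st.2 (PySem.List.pyGetD xs q 0 - pm + PySem.List.pyGetD bestRight q 0))

def findMaxValue_alt (arr : List Int) (n : Int) : Int :=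
  if n < 4 then -1
  else
    let xs := PySem.List.slice arr none (some n)
    let sufMax := PySem.List.pyGetD xs (n - 1) 0
    let cur := sufMax - PySem.List.pyGetD xs (n - 2) 0
    let st := (PySem.List.pyRange (n - 3) 0 (-1)).foldl (stepB1 xs) (sufMax, cur, [cur])
    let bestRight := st.2.2.reverse
    let preMin := PySem.List.pyGetD xs 0 0
    let ans := PySem.List.pyGetD xs 1 0 - preMin + PySem.List.pyGetD bestRight 1 0
    ((PySem.List.pyRange 2 (n - 2) 1).foldl (stepB2 xs bestRight) (preMin, ans)).2

-- ===== PRECONDITION & SPEC =====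
-- Pre_ excludes exactly the inputs where Python A raises IndexError: 4 ≤ n but arr shorter than n.
def Pre_findMaxValue (arr : List Int) (n : Int) : Prop := 4 ≤ n → n ≤ arr.length
instance (arr : List Int) (n : Int) : Decidable (Pre_findMaxValue arr n) := by
  unfold Pre_findMaxValue; infer_instance

def pvWitness_findMaxValue : List Int × Int := ([1, 2, 3, 4, 5], 5)

def Spec_findMaxValue (arr : List Int) (n : Int) (out : Int) : Prop := out = findMaxValue_alt arr n
instance (arr : List Int) (n : Int) (out : Int) : Decidable (Spec_findMaxValue arr n out) := by
  unfold Spec_findMaxValue; infer_instance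

-- ===== CLAIM (what is proved, stated in full; the proofs are below) =====
def Claim_equal_findMaxValue : Prop := ∀ (arr : List Int) (n : Int), Dom_findMaxValue arr n →
  Pre_findMaxValue arr n → Spec_findMaxValue arr n (findMaxValue arr n)

-- ===== LEMMAS AND PROOFS =====

-- max of g over the index interval [a, a+j]
def rmax (g : ℕ → Int) (a : ℕ) : ℕ → Int
  | 0 => g a
  | j + 1 => max (rmax g a j) (g (a + (j + 1)))

lemma le_rmax (g : ℕ → Int) (a j i : ℕ) (h1 : a ≤ i) (h2 : i ≤ a + j) : g i ≤ rmax g a j := by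
  induction j with
  | zero =>
    have : i = a := by omega
    simp [this, rmax]
  | succ j ih =>
    rcases Nat.lt_or_ge i (a + (j + 1)) with h | h
    · exact le_trans (ih (by omega)) (le_max_left _ _)
    · have : i = a + (j + 1) := by omega
      simp [rmax, this]

lemma rmax_le (g : ℕ → Int) (a j : ℕ) (c : Int) (h : ∀ i, a ≤ i → i ≤ a + j → g i ≤ c) :
    rmax g a j ≤ c := by
  induction j with
  | zero => simpa [rmax] using h a (by omega) (by omega)
  | succ j ih =>
    simp only [rmax, max_le_iff]
    exact ⟨ih (fun i h1 h2 => h i h1 (by omega)), h _ (by omega) (by omega)⟩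

lemma rmax_congr (g g' : ℕ → Int) (a j : ℕ) (h : ∀ i, a ≤ i → i ≤ a + j → g i = g' i) :
    rmax g a j = rmax g' a j := by
  induction j with
  | zero => simp [rmax, h a (by omega) (by omega)]
  | succ j ih =>
    simp [rmax, ih (fun i h1 h2 => h i h1 (by omega)), h (a + (j+1)) (by omega) (by omega)]

lemma rmax_add_const (g : ℕ → Int) (a j : ℕ) (c : Int) :
    rmax g a j + c = rmax (fun i => g i + c) a j := by
  induction j with
  | zero => simp [rmax]
  | succ j ih => simp [rmax, ← ih, max_add_add_right]

lemma rmax_cons (g : ℕ → Int) (a j : ℕ) :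
    rmax g a (j + 1) = max (g a) (rmax g (a + 1) j) := by
  induction j with
  | zero => simp [rmax]
  | succ j ih =>
    have h1 : rmax g a (j + 1 + 1) = max (rmax g a (j + 1)) (g (a + (j + 2))) := rfl
    have h2 : rmax g (a + 1) (j + 1) = max (rmax g (a + 1) j) (g (a + 1 + (j + 1))) := rfl
    rw [h1, h2, ih, max_assoc]
    have : a + (j + 2) = a + 1 + (j + 1) := by omega
    rw [this]

-- the nested "prefix" functions: L1 q = best (-arr p + arr q) over p<q, etc.
def L1 (f : ℕ → Int) (q : ℕ) : Int := rmax (fun p => -f p) 0 (q - 1) + f q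
def L2 (f : ℕ → Int) (r : ℕ) : Int := rmax (L1 f) 1 (r - 2) - f r
def L3 (f : ℕ → Int) (s : ℕ) : Int := rmax (L2 f) 2 (s - 3) + f s

-- B's suffix quantity: BRf f N t = best (arr s - arr r) over t ≤ r < s ≤ N
def BRf (f : ℕ → Int) (N t : ℕ) : Int :=
  rmax (fun r => rmax f (r + 1) (N - (r + 1)) - f r) t (N - 1 - t)

lemma bridge (f : ℕ → Int) (N : ℕ) (hN : 3 ≤ N) :
    rmax (L3 f) 3 (N - 3) = rmax (fun q => L1 f q + BRf f N (q + 1)) 1 (N - 3) := by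
  apply le_antisymm
  · apply rmax_le
    intro s hs1 hs2
    unfold L3
    rw [rmax_add_const]
    apply rmax_le
    intro r hr1 hr2
    show L2 f r + f s ≤ _
    unfold L2
    have hre : rmax (L1 f) 1 (r - 2) - f r + f s
        = rmax (fun q => L1 f q + (f s - f r)) 1 (r - 2) := by
      rw [← rmax_add_const]; ring
    rw [hre]
    apply rmax_le
    intro q hq1 hq2
    show L1 f q + (f s - f r) ≤ _
    refine le_trans ?_ (le_rmax _ 1 (N - 3) q hq1 (by omega))
    show _ ≤ L1 f q + BRf f N (q + 1)
    apply add_le_add_right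
    unfold BRf
    refine le_trans ?_ (le_rmax _ (q + 1) (N - 1 - (q + 1)) r (by omega) (by omega))
    show f s - f r ≤ rmax f (r + 1) (N - (r + 1)) - f r
    apply sub_le_sub_right
    exact le_rmax f (r + 1) (N - (r + 1)) s (by omega) (by omega)
  · apply rmax_le
    intro q hq1 hq2
    show L1 f q + BRf f N (q + 1) ≤ _
    unfold BRf
    have hre : L1 f q + rmax (fun r => rmax f (r + 1) (N - (r + 1)) - f r) (q + 1) (N - 1 - (q + 1))
        = rmax (fun r => (rmax f (r + 1) (N - (r + 1)) - f r) + L1 f q) (q + 1) (N - 1 - (q + 1)) := by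
      rw [← rmax_add_const]; ring
    rw [hre]
    apply rmax_le
    intro r hr1 hr2
    show rmax f (r + 1) (N - (r + 1)) - f r + L1 f q ≤ _
    have hre2 : rmax f (r + 1) (N - (r + 1)) - f r + L1 f q
        = rmax (fun s => f s + (L1 f q - f r)) (r + 1) (N - (r + 1)) := by
      rw [← rmax_add_const]; ring
    rw [hre2]
    apply rmax_le
    intro s hs1 hs2
    show f s + (L1 f q - f r) ≤ _
    refine le_trans ?_ (le_rmax _ 3 (N - 3) s (by omega) (by omega))
    show _ ≤ L3 f s
    unfold L3
    have hre3 : f s + (L1 f q - f r) = (L1 f q - f r) + f s := by ring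
    rw [hre3]
    apply add_le_add_left
    refine le_trans ?_ (le_rmax _ 2 (s - 3) r (by omega) (by omega))
    show _ ≤ L2 f r
    unfold L2
    apply sub_le_sub_right
    exact le_rmax _ 1 (r - 2) q hq1 (by omega)

-- A's loop invariant
lemma A_loop (arr : List Int) (k : ℕ) :
    (PySem.List.pyRange 4 (4 + (k : Int)) 1).foldl (stepA arr)
      (PySem.List.pyGetD arr 0 0 * (-1),
       PySem.List.pyGetD arr 1 0 - PySem.List.pyGetD arr 0 0,
       PySem.List.pyGetD arr 1 0 - PySem.List.pyGetD arr 0 0 - PySem.List.pyGetD arr 2 0,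
       PySem.List.pyGetD arr 1 0 - PySem.List.pyGetD arr 0 0 - PySem.List.pyGetD arr 2 0
         + PySem.List.pyGetD arr 3 0)
    = (rmax (fun p => -(arr.getD p 0)) 0 k, rmax (L1 (fun j => arr.getD j 0)) 1 k,
       rmax (L2 (fun j => arr.getD j 0)) 2 k, rmax (L3 (fun j => arr.getD j 0)) 3 k) := by
  induction k with
  | zero =>
    rw [show (4 + ((0 : ℕ) : Int)) = 4 by norm_num,
        PySem.List.pyRange_one_eq_nil (le_refl (4 : Int))]
    show (_, _, _, _) = (_, _, _, _)
    simp only [Prod.mk.injEq, PySem.List.pyGetD_ofNat']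
    refine ⟨?_, ?_, ?_, ?_⟩ <;> simp [rmax, L1, L2, L3] <;> ring
  | succ k ih =>
    rw [show (4 + ((k + 1 : ℕ) : Int)) = (4 + (k : Int)) + 1 by push_cast; ring,
        PySem.List.pyRange_one_succ_right (by omega : (4 : Int) ≤ 4 + (k : Int)),
        List.foldl_append, ih]
    have e1 : (4 + (k : Int)) - 3 = ((k + 1 : ℕ) : Int) := by push_cast; ring
    have e2 : (4 + (k : Int)) - 2 = ((k + 2 : ℕ) : Int) := by push_cast; ring
    have e3 : (4 + (k : Int)) - 1 = ((k + 3 : ℕ) : Int) := by push_cast; ring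
    have e4 : (4 + (k : Int)) = ((k + 4 : ℕ) : Int) := by push_cast; ring
    simp only [List.foldl, stepA]
    rw [e1, e2, e3, e4]
    simp only [PySem.List.pyGetD_natCast]
    show (_, _, _, _) = (_, _, _, _)
    have c1 : max (rmax (fun p => -arr.getD p 0) 0 k) (arr.getD (k + 1) 0 * (-1))
        = rmax (fun p => -arr.getD p 0) 0 (k + 1) := by
      show _ = max _ ((fun p => -arr.getD p 0) (0 + (k + 1)))
      simp only [zero_add]; ring_nf
    rw [c1]
    have c2 : max (rmax (L1 fun j => arr.getD j 0) 1 k)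
        (rmax (fun p => -arr.getD p 0) 0 (k + 1) + arr.getD (k + 2) 0)
        = rmax (L1 fun j => arr.getD j 0) 1 (k + 1) := by
      show _ = max _ ((L1 fun j => arr.getD j 0) (1 + (k + 1)))
      have : (1 + (k + 1)) = k + 2 := by omega
      rw [this]
      show _ = max _ (rmax (fun p => -arr.getD p 0) 0 (k + 2 - 1) + arr.getD (k + 2) 0)
      norm_num
    rw [c2]
    have c3 : max (rmax (L2 fun j => arr.getD j 0) 2 k)
        (rmax (L1 fun j => arr.getD j 0) 1 (k + 1) - arr.getD (k + 3) 0)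
        = rmax (L2 fun j => arr.getD j 0) 2 (k + 1) := by
      show _ = max _ ((L2 fun j => arr.getD j 0) (2 + (k + 1)))
      have : (2 + (k + 1)) = k + 3 := by omega
      rw [this]
      show _ = max _ (rmax (L1 fun j => arr.getD j 0) 1 (k + 3 - 2) - arr.getD (k + 3) 0)
      have h32 : k + 3 - 2 = k + 1 := by omega
      rw [h32]
    rw [c3]
    have c4 : max (rmax (L3 fun j => arr.getD j 0) 3 k)
        (rmax (L2 fun j => arr.getD j 0) 2 (k + 1) + arr.getD (k + 4) 0)
        = rmax (L3 fun j => arr.getD j 0) 3 (k + 1) := by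
      show _ = max _ ((L3 fun j => arr.getD j 0) (3 + (k + 1)))
      have : (3 + (k + 1)) = k + 4 := by omega
      rw [this]
      show _ = max _ (rmax (L2 fun j => arr.getD j 0) 2 (k + 4 - 3) + arr.getD (k + 4) 0)
      have h43 : k + 4 - 3 = k + 1 := by omega
      rw [h43]
    rw [c4]

-- state of B's backward loop after having processed index t (t down from N-1)
def stB (xs : List Int) (N t : ℕ) : Int × Int × List Int :=
  (rmax (fun j => xs.getD j 0) (t + 1) (N - (t + 1)),
   BRf (fun j => xs.getD j 0) N t,
   ((List.range' t (N - t)).map (BRf (fun j => xs.getD j 0) N)).reverse)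

lemma B_back_step (xs : List Int) (N a : ℕ) (_h1 : 1 ≤ a) (h2 : a ≤ N - 2) (hN : 3 ≤ N) :
    stepB1 xs (stB xs N (a + 1)) ((a : ℕ) : Int) = stB xs N a := by
  unfold stepB1 stB
  have e1 : ((a : ℕ) : Int) + 1 = ((a + 1 : ℕ) : Int) := by push_cast; ring
  rw [e1]
  simp only [PySem.List.pyGetD_natCast]
  have c1 : max (rmax (fun j => xs.getD j 0) (a + 1 + 1) (N - (a + 1 + 1))) (xs.getD (a + 1) 0)
      = rmax (fun j => xs.getD j 0) (a + 1) (N - (a + 1)) := by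
    rw [show N - (a + 1) = (N - (a + 1 + 1)) + 1 by omega, rmax_cons, max_comm]
  rw [c1]
  have c2 : max (BRf (fun j => xs.getD j 0) N (a + 1))
      (rmax (fun j => xs.getD j 0) (a + 1) (N - (a + 1)) - xs.getD a 0)
      = BRf (fun j => xs.getD j 0) N a := by
    unfold BRf
    rw [show N - 1 - a = (N - 1 - (a + 1)) + 1 by omega, rmax_cons, max_comm]
  rw [c2]
  rw [show N - a = (N - (a + 1)) + 1 by omega, List.range'_succ, List.map_cons,
      List.reverse_cons]

lemma B_back (xs : List Int) (N : ℕ) (hN : 3 ≤ N) :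
    ∀ a : ℕ, a ≤ N - 2 →
    (PySem.List.pyRange ((a : ℕ) : Int) 0 (-1)).foldl (stepB1 xs) (stB xs N (a + 1))
      = stB xs N 1 := by
  intro a
  induction a with
  | zero =>
    intro _
    rw [show ((0 : ℕ) : Int) = 0 by norm_num,
        PySem.List.pyRange_neg_one_eq_nil (le_refl (0 : Int))]
    rfl
  | succ a ih =>
    intro h
    rw [PySem.List.pyRange_neg_one_cons (by exact_mod_cast Nat.succ_pos a),
        List.foldl_cons, B_back_step xs N (a + 1) (by omega) (by omega) hN,
        show ((a + 1 : ℕ) : Int) - 1 = ((a : ℕ) : Int) by push_cast; ring]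
    exact ih (by omega)

lemma B_fwd (xs bestRight : List Int) (N : ℕ) (hN : 3 ≤ N)
    (hbr : ∀ j : ℕ, j < N - 1 → bestRight.getD j 0 = BRf (fun j' => xs.getD j' 0) N (j + 1)) :
    ∀ k : ℕ, k ≤ N - 3 →
    (PySem.List.pyRange 2 (2 + (k : Int)) 1).foldl (stepB2 xs bestRight)
      (xs.getD 0 0, xs.getD 1 0 - xs.getD 0 0 + bestRight.getD 1 0)
    = (-(rmax (fun p => -(xs.getD p 0)) 0 k),
       rmax (fun q => L1 (fun j => xs.getD j 0) q + BRf (fun j => xs.getD j 0) N (q + 1)) 1 k) := by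
  intro k
  induction k with
  | zero =>
    intro _
    rw [show (2 + ((0 : ℕ) : Int)) = 2 by norm_num,
        PySem.List.pyRange_one_eq_nil (le_refl (2 : Int)), List.foldl_nil]
    show (_, _) = (_, _)
    simp only [Prod.mk.injEq]
    constructor
    · simp [rmax]
    · rw [hbr 1 (by omega)]
      simp [rmax, L1]
      ring
  | succ k ih =>
    intro h
    rw [show (2 + ((k + 1 : ℕ) : Int)) = (2 + (k : Int)) + 1 by push_cast; ring,
        PySem.List.pyRange_one_succ_right (by omega : (2 : Int) ≤ 2 + (k : Int)),
        List.foldl_append, ih (by omega), List.foldl_cons, List.foldl_nil]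
    unfold stepB2
    rw [show (2 + (k : Int)) - 1 = ((k + 1 : ℕ) : Int) by push_cast; ring]
    rw [show (2 + (k : Int)) = ((k + 2 : ℕ) : Int) by push_cast; ring]
    simp only [PySem.List.pyGetD_natCast]
    rw [hbr (k + 2) (by omega)]
    have c1 : min (-(rmax (fun p => -(xs.getD p 0)) 0 k)) (xs.getD (k + 1) 0)
        = -(rmax (fun p => -(xs.getD p 0)) 0 (k + 1)) := by
      show _ = -(max (rmax (fun p => -(xs.getD p 0)) 0 k) ((fun p => -(xs.getD p 0)) (0 + (k + 1))))
      simp only [zero_add]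
      omega
    rw [c1]
    congr 1
    show _ = max _ ((fun q => L1 (fun j => xs.getD j 0) q + BRf (fun j => xs.getD j 0) N (q + 1))
      (1 + (k + 1)))
    rw [show 1 + (k + 1) = k + 2 by omega]
    show _ = max _ (L1 (fun j => xs.getD j 0) (k + 2) + BRf (fun j => xs.getD j 0) N (k + 2 + 1))
    unfold L1
    rw [show k + 2 - 1 = k + 1 by omega, show k + 2 + 1 = k + 3 by omega]
    congr 1
    ring

lemma L1_congr (f f' : ℕ → Int) (M q : ℕ) (h : ∀ j, j ≤ M → f j = f' j) (hq : q ≤ M) (hq1 : 1 ≤ q) :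
    L1 f q = L1 f' q := by
  unfold L1
  rw [h q hq, rmax_congr (fun p => -f p) (fun p => -f' p) 0 (q - 1)
    (fun i _ h2 => by show -f i = -f' i; rw [h i (by omega)])]

lemma L2_congr (f f' : ℕ → Int) (M r : ℕ) (h : ∀ j, j ≤ M → f j = f' j) (hr : r ≤ M) (hr1 : 2 ≤ r) :
    L2 f r = L2 f' r := by
  unfold L2
  rw [h r hr, rmax_congr (L1 f) (L1 f') 1 (r - 2)
    (fun i _ h2 => L1_congr f f' M i h (by omega) (by omega))]

lemma L3_congr (f f' : ℕ → Int) (M s : ℕ) (h : ∀ j, j ≤ M → f j = f' j) (hs : s ≤ M) (hs1 : 3 ≤ s) :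
    L3 f s = L3 f' s := by
  unfold L3
  rw [h s hs, rmax_congr (L2 f) (L2 f') 2 (s - 3)
    (fun i _ h2 => L2_congr f f' M i h (by omega) (by omega))]

lemma getD_map_range' (g : ℕ → Int) (s m j : ℕ) (h : j < m) :
    ((List.range' s m).map g).getD j 0 = g (s + j) := by
  rw [List.getD_eq_getElem?_getD, List.getElem?_map]
  simp [h]

-- ===== VERDICT (by name: the statement is the Claim_ definition above) =====
theorem findMaxValue_spec : Claim_equal_findMaxValue := by
  intro arr n _ hpre
  unfold Spec_findMaxValue
  by_cases hn : n < 4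
  · unfold findMaxValue findMaxValue_alt
    rw [if_pos hn, if_pos hn]
  · have h4 : 4 ≤ n := by omega
    have hlen : n ≤ arr.length := hpre h4
    obtain ⟨n', rfl⟩ : ∃ n'' : ℕ, n = (n'' : Int) := ⟨n.toNat, (Int.toNat_of_nonneg (by omega)).symm⟩
    have h4' : 4 ≤ n' := by exact_mod_cast h4
    have hlen' : n' ≤ arr.length := by exact_mod_cast hlen
    set N := n' - 1 with hNdef
    have hN : 3 ≤ N := by omega
    -- A's loop result
    have hA : findMaxValue arr (n' : Int) = rmax (L3 (fun j => arr.getD j 0)) 3 (n' - 4) := by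
      unfold findMaxValue
      rw [if_neg (by omega), show ((n' : ℕ) : Int) = 4 + ((n' - 4 : ℕ) : Int) by omega,
          A_loop arr (n' - 4)]
    -- the sliced list xs and its entries
    have hnn : (0 : Int) ≤ ((n' : ℕ) : Int) := by omega
    have hxs_take : PySem.List.slice arr none (some ((n' : ℕ) : Int)) = arr.take n' := by
      rw [PySem.List.slice_to arr hnn]
      norm_num
    set xs : List Int := arr.take n' with hxs
    have hxlen : xs.length = n' := by
      rw [hxs, List.length_take]
      omega
    have hf_eq : ∀ j, j ≤ N → arr.getD j 0 = xs.getD j 0 := by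
      intro j hj
      have hj' : j < n' := by omega
      rw [hxs]
      simp only [List.getD_eq_getElem?_getD]
      rw [List.getElem?_take_of_lt hj']
    -- initial state of B's backward loop is stB xs N (N - 1)
    have hinit : stB xs N (N - 1)
        = (xs.getD N 0, xs.getD N 0 - xs.getD (N - 1) 0, [xs.getD N 0 - xs.getD (N - 1) 0]) := by
      unfold stB BRf
      rw [show N - 1 + 1 = N by omega, show N - N = 0 by omega,
          show N - 1 - (N - 1) = 0 by omega, show N - (N - 1) = 1 by omega]
      simp [rmax, List.range'_succ]
      rw [show N - 1 + 1 = N by omega, show N - N = 0 by omega]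
      rfl
    -- B's backward loop result
    have hback := B_back xs N hN (N - 2) (le_refl _)
    rw [show N - 2 + 1 = N - 1 by omega, hinit] at hback
    -- the bestRight table lookups
    have hbr : ∀ j : ℕ, j < N - 1 →
        ((((List.range' 1 (N - 1)).map (BRf (fun j' => xs.getD j' 0) N)).reverse.reverse).getD j 0)
        = BRf (fun j' => xs.getD j' 0) N (j + 1) := by
      intro j hj
      rw [List.reverse_reverse, getD_map_range' _ 1 (N - 1) j hj, show 1 + j = j + 1 by omega]
    -- B's value
    have hB : findMaxValue_alt arr (n' : Int) =
        rmax (fun q => L1 (fun j => xs.getD j 0) q + BRf (fun j => xs.getD j 0) N (q + 1)) 1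
          (N - 3) := by
      unfold findMaxValue_alt
      rw [if_neg (by omega)]
      simp only [hxs_take]
      rw [show ((n' : ℕ) : Int) - 1 = ((N : ℕ) : Int) by omega,
          show ((n' : ℕ) : Int) - 2 = ((N - 1 : ℕ) : Int) by omega,
          show ((n' : ℕ) : Int) - 3 = ((N - 2 : ℕ) : Int) by omega]
      simp only [PySem.List.pyGetD_natCast]
      rw [hback]
      simp only [stB]
      have hfwd := B_fwd xs
        (((List.range' 1 (N - 1)).map (BRf (fun j' => xs.getD j' 0) N)).reverse.reverse)
        N hN hbr (N - 3) (le_refl _)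
      simp only [PySem.List.pyGetD_ofNat']
      rw [show ((N - 1 : ℕ) : Int) = 2 + ((N - 3 : ℕ) : Int) by omega]
      rw [hfwd]
    -- combine: A = bridge = B
    rw [hA, hB, ← bridge (fun j => xs.getD j 0) N hN, show n' - 4 = N - 3 by omega]
    exact rmax_congr _ _ 3 (N - 3)
      (fun s h1 h2 => L3_congr _ _ N s hf_eq (by omega) (by omega))
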